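-- pv_equiv track=rewrite | github.com/jinho-waah/Practice | 백준/Gold/14267. 회사 문화 1/회사 문화 1.py | propagate_praise
-- ===== SOURCE A (Python) =====
-- from collections import defaultdict, deque
--
-- def propagate_praise(n, m, hierarchy, praises):
--     # 트리 구조 생성
--     tree = defaultdict(list)
--     for employee, manager in enumerate(hierarchy, start=1):
--         if manager != -1:
--             tree[manager].append(employee)
--
--     # 칭찬 초기화
--     praise = [0] * (n + 1)
--
--     # 초기 칭찬 적용
--     for i, w in praises:
--         praise[i] += w
--
--     # BFS로 칭찬 전파
--     queue = deque([1])  # 사장부터 시작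
--     while queue:
--         current = queue.popleft()
--         for subordinate in tree[current]:
--             praise[subordinate] += praise[current]  # 현재 칭찬을 부하에게 전달
--             queue.append(subordinate)
--
--     return praise[1:]  # 1번부터 n번까지의 칭찬 점수 반환
-- ===== SOURCE B (Python) =====
-- def propagate_praise(n, m, hierarchy, praises):
--     # Single left-to-right pass: each employee's superior precedes them, so the
--     # superior's total is already final when the employee is reached; a
--     # reachability array confines propagation to the boss's (employee 1's) tree.
--     praise = [0] * (n + 1)
--     for i, w in praises:
--         praise[i] += w
--     reachable = [False] * (n + 1)
--     reachable[1] = True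
--     for employee, manager in enumerate(hierarchy, start=1):
--         if 1 <= manager <= n and reachable[manager]:
--             reachable[employee] = True
--             praise[employee] += praise[manager]
--     return praise[1:]
-- ===== Notes on version B (the rewrite author's own statement) =====
-- stated objective: alternative
-- what changed: Replaces A's child-adjacency defaultdict plus BFS deque traversal with a single left-to-right array pass (superiors precede subordinates on the admitted inputs), with a reachability array confining propagation to employee 1's tree; it drops the dict/deque machinery entirely.
-- outside the precondition, e.g. on propagate_praise(3, 0, [-1, 3, 1], [(1, 5)]): A returns [5, 5, 5], B returns [5, 0, 5]; on propagate_praise(0, 0, [], []): A returns [], B raises IndexError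
import Mathlib
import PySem

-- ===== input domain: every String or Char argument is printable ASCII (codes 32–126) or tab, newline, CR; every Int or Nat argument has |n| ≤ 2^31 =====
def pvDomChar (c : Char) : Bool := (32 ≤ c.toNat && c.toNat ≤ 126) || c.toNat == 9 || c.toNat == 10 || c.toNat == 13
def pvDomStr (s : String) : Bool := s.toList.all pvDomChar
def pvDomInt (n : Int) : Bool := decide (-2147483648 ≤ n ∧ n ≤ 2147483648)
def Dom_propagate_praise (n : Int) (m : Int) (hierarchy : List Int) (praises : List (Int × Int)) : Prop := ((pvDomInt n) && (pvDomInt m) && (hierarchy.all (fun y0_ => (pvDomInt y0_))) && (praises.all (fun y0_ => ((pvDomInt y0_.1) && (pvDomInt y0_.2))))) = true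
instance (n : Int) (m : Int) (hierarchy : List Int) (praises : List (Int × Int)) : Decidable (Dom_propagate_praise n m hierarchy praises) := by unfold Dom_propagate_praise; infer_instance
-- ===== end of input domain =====

-- B replaces A's adjacency-dict + BFS queue with one left-to-right pass guarded by a
-- reachability array (superiors precede subordinates on the admitted inputs).

-- shared by both ports: 'praise = [0]*(n+1)' then 'for i, w in praises: praise[i] += w'
-- (identical lines in Source A and Source B)
def pvInit (n : Int) (praises : List (Int × Int)) : List Int :=
  praises.foldl
    (fun pr p => PySem.List.pySetD pr p.1 (PySem.List.pyGetD pr p.1 0 + p.2))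
    (List.replicate (n + 1).toNat 0)

-- ===== PORT A =====
-- the 'while queue:' BFS loop; fuel bounds the number of pops (≤ len(hierarchy)+1 on Pre_)
def pvBfs (tree : PySem.Dict Int (List Int)) : Nat → List Int → List Int → List Int
  | 0, _, pr => pr
  | _ + 1, [], pr => pr
  | f + 1, c :: q, pr =>
    let st := (tree.getD c []).foldl
      (fun (st : List Int × List Int) s =>
        (st.1 ++ [s],
         PySem.List.pySetD st.2 s (PySem.List.pyGetD st.2 s 0 + PySem.List.pyGetD st.2 c 0)))
      (q, pr)
    pvBfs tree f st.1 st.2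

def propagate_praise (n : Int) (m : Int) (hierarchy : List Int) (praises : List (Int × Int)) : List Int :=
  let tree := (PySem.List.enumerate hierarchy 1).foldl
    (fun d p => if p.2 ≠ -1 then d.modify p.2 [] (· ++ [p.1]) else d) PySem.Dict.empty
  let praise := pvInit n praises
  PySem.List.slice (pvBfs tree (hierarchy.length + 1) [1] praise) (some 1) none

-- ===== PORT B =====
def propagate_praise_alt (n : Int) (m : Int) (hierarchy : List Int) (praises : List (Int × Int)) : List Int :=
  let praise := pvInit n praises
  let reach := PySem.List.pySetD (List.replicate (n + 1).toNat false) 1 true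
  let st := (PySem.List.enumerate hierarchy 1).foldl
    (fun (st : List Bool × List Int) p =>
      if 1 ≤ p.2 ∧ p.2 ≤ n ∧ PySem.List.pyGetD st.1 p.2 false = true then
        (PySem.List.pySetD st.1 p.1 true,
         PySem.List.pySetD st.2 p.1 (PySem.List.pyGetD st.2 p.1 0 + PySem.List.pyGetD st.2 p.2 0))
      else st)
    (reach, praise)
  PySem.List.slice st.2 (some 1) none

-- ===== PRECONDITION & SPEC =====
-- Pre_: n ≥ 1, every praise index a valid Python index into the praise array, and the
-- hierarchy either well formed as BOJ 14267 guarantees (at most n employees, each superior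
-- -1 or an earlier employee's number) or with nobody reporting to employee 1 (then nothing
-- propagates in A). It excludes inputs on which A still returns: n ≤ 0 (B's natural pass
-- raises there) and hierarchies where some employee reports to 1 but another superior entry
-- is not -1 or an earlier employee's number (there A may diverge on a cycle or propagate
-- along a forward edge that B's single pass does not), as the problem rules such inputs out.
def Pre_propagate_praise (n : Int) (m : Int) (hierarchy : List Int) (praises : List (Int × Int)) : Prop :=
  1 ≤ n ∧ (∀ q ∈ praises, -(n + 1) ≤ q.1 ∧ q.1 ≤ n) ∧
  (((hierarchy.length : Int) ≤ n ∧
    (∀ j : Nat, j < hierarchy.length →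
      (hierarchy.getD j (-1) = -1 ∨ (1 ≤ hierarchy.getD j (-1) ∧ hierarchy.getD j (-1) ≤ (j : Int))))) ∨
   (1 : Int) ∉ hierarchy)

instance (n : Int) (m : Int) (hierarchy : List Int) (praises : List (Int × Int)) : Decidable (Pre_propagate_praise n m hierarchy praises) := by
  unfold Pre_propagate_praise; infer_instance

def pvWitness_propagate_praise : Int × Int × List Int × (List (Int × Int)) :=
  (3, 1, [-1, 1, 2], [(2, 5)])

def Spec_propagate_praise (n : Int) (m : Int) (hierarchy : List Int) (praises : List (Int × Int)) (out : List Int) : Prop := out = propagate_praise_alt n m hierarchy praises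
instance (n : Int) (m : Int) (hierarchy : List Int) (praises : List (Int × Int)) (out : List Int) : Decidable (Spec_propagate_praise n m hierarchy praises out) := by unfold Spec_propagate_praise; infer_instance

-- ===== CLAIM (what is proved, stated in full; the proofs are below) =====
def Claim_equal_propagate_praise : Prop := ∀ (n : Int) (m : Int) (hierarchy : List Int) (praises : List (Int × Int)), Dom_propagate_praise n m hierarchy praises → Pre_propagate_praise n m hierarchy praises → Spec_propagate_praise n m hierarchy praises (propagate_praise n m hierarchy praises)

-- ===== LEMMAS AND PROOFS =====
def pvReach (H : List Int) : Nat → Bool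
  | 0 => false
  | 1 => true
  | e + 2 =>
    if h : 1 ≤ H.getD (e + 1) (-1) ∧ H.getD (e + 1) (-1) ≤ (e + 1 : Int) then
      pvReach H (H.getD (e + 1) (-1)).toNat
    else false
  decreasing_by
    have h1 := h.1; have h2 := h.2; omega

def pvFinal (H P : List Int) : Nat → Int
  | 0 => P.getD 0 0
  | 1 => P.getD 1 0
  | e + 2 =>
    P.getD (e + 2) 0 +
      (if h : 1 ≤ H.getD (e + 1) (-1) ∧ H.getD (e + 1) (-1) ≤ (e + 1 : Int) then
        (if pvReach H (H.getD (e + 1) (-1)).toNat then pvFinal H P (H.getD (e + 1) (-1)).toNat else 0)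
      else 0)
  decreasing_by
    have h1 := h.1; have h2 := h.2; omega

-- ---- small bridges ----

theorem pvGetDSet {α : Type} (xs : List α) (a e : Nat) (v d : α) :
    (xs.set a v).getD e d = if e = a ∧ a < xs.length then v else xs.getD e d := by
  simp only [List.getD, List.getElem?_set]
  by_cases h1 : a = e
  · subst h1
    by_cases h2 : a < xs.length <;> simp [h2]
  · have h1' : ¬ (e = a) := fun h => h1 h.symm
    simp [h1, h1']

theorem pvPyGetD_nonneg {α : Type} (xs : List α) (i : Int) (d : α) (h0 : 0 ≤ i) :
    PySem.List.pyGetD xs i d = xs.getD i.toNat d := by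
  by_cases h : i.toNat < xs.length
  · rw [PySem.List.pyGetD_eq_getElem xs d h0 (by omega), List.getD_eq_getElem xs d h]
  · rw [PySem.List.pyGetD_of_none xs i d, List.getD_eq_default xs d (by omega)]
    rw [PySem.List.pyGet?_eq_none_iff]
    simp only [PySem.Raise.InRange]
    omega

theorem pvPySetD_nat {α : Type} (xs : List α) (e : Nat) (v : α) :
    PySem.List.pySetD xs (e : Int) v = xs.set e v := by
  rw [PySem.List.pySetD_of_nonneg xs v (by positivity)]
  simp

theorem pvPyGetD_nat {α : Type} (xs : List α) (e : Nat) (d : α) :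
    PySem.List.pyGetD xs (e : Int) d = xs.getD e d := by
  rw [pvPyGetD_nonneg xs (e : Int) d (by positivity)]
  simp

theorem pvFoldSetLength : ∀ (l : List (Int × Int)) (pr : List Int),
    (l.foldl (fun pr p => PySem.List.pySetD pr p.1 (PySem.List.pyGetD pr p.1 0 + p.2)) pr).length = pr.length := by
  intro l
  induction l with
  | nil => intro pr; rfl
  | cons p t ih => intro pr; rw [List.foldl_cons, ih, PySem.List.length_pySetD]

theorem pvInit_length (n : Int) (praises : List (Int × Int)) :
    (pvInit n praises).length = (n + 1).toNat := by
  unfold pvInit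
  rw [pvFoldSetLength]
  simp

-- ---- reach / final unfolding ----

theorem pvReach_eq (H : List Int) (e : Nat) (he : 2 ≤ e) :
    pvReach H e =
      if 1 ≤ H.getD (e - 1) (-1) ∧ H.getD (e - 1) (-1) ≤ ((e : Int) - 1) then
        pvReach H (H.getD (e - 1) (-1)).toNat
      else false := by
  obtain ⟨e', rfl⟩ : ∃ e', e = e' + 2 := ⟨e - 2, by omega⟩
  rw [pvReach]
  have harg : e' + 2 - 1 = e' + 1 := by omega
  have hcast : ((e' + 2 : Nat) : Int) - 1 = ((e' + 1 : Nat) : Int) := by push_cast; ring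
  rw [harg, hcast]
  split_ifs with h1 h2 h2 <;> first | rfl | (exfalso; omega)

theorem pvFinal_eq (H P : List Int) (e : Nat) (he : 2 ≤ e) :
    pvFinal H P e =
      P.getD e 0 +
        (if 1 ≤ H.getD (e - 1) (-1) ∧ H.getD (e - 1) (-1) ≤ ((e : Int) - 1) then
          (if pvReach H (H.getD (e - 1) (-1)).toNat then pvFinal H P (H.getD (e - 1) (-1)).toNat else 0)
        else 0) := by
  obtain ⟨e', rfl⟩ : ∃ e', e = e' + 2 := ⟨e - 2, by omega⟩
  rw [pvFinal]
  have harg : e' + 2 - 1 = e' + 1 := by omega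
  have hcast : ((e' + 2 : Nat) : Int) - 1 = ((e' + 1 : Nat) : Int) := by push_cast; ring
  rw [harg, hcast]
  split_ifs with h1 h2 h2 <;> first | rfl | (exfalso; omega)

theorem pvFinal_zero (H P : List Int) : pvFinal H P 0 = P.getD 0 0 := by rw [pvFinal]
theorem pvFinal_one (H P : List Int) : pvFinal H P 1 = P.getD 1 0 := by rw [pvFinal]
theorem pvReach_one (H : List Int) : pvReach H 1 = true := by rw [pvReach]

theorem pvFinal_of_gt_len (H P : List Int) (e : Nat) (h : H.length < e) :
    pvFinal H P e = P.getD e 0 := by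
  match e, h with
  | 1, h => exact pvFinal_one H P
  | e + 2, h =>
    rw [pvFinal_eq H P (e + 2) (by omega)]
    have : H.getD (e + 2 - 1) (-1) = -1 := List.getD_eq_default H (-1) (by omega)
    rw [this]
    norm_num

-- ---- children of a node in A's tree ----

def pvChildren (H : List Int) (c : Int) : List Int :=
  ((PySem.List.enumerate H 1).filter (fun p => p.2 == c)).map (fun p => p.1)

theorem pvMemChildren (H : List Int) (c s : Int) :
    s ∈ pvChildren H c ↔ ∃ k : Nat, k < H.length ∧ s = 1 + (k : Int) ∧ H.getD k (-1) = c := by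
  unfold pvChildren
  simp only [List.mem_map, List.mem_filter, PySem.List.mem_enumerate_iff]
  constructor
  · rintro ⟨p, ⟨⟨k, hk, rfl⟩, hc⟩, rfl⟩
    exact ⟨k, hk, rfl, by rw [List.getD_eq_getElem H (-1) hk]; exact beq_iff_eq.mp hc⟩
  · rintro ⟨k, hk, rfl, hv⟩
    refine ⟨(1 + (k : Int), H[k]), ⟨⟨k, hk, rfl⟩, ?_⟩, rfl⟩
    rw [beq_iff_eq, ← List.getD_eq_getElem H (-1) hk]; exact hv

theorem pvMemChildrenNat (H : List Int) (c : Int) (e : Nat) :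
    ((e : Int) ∈ pvChildren H c) ↔ (1 ≤ e ∧ e ≤ H.length ∧ H.getD (e - 1) (-1) = c) := by
  rw [pvMemChildren]
  constructor
  · rintro ⟨k, hk, hs, hv⟩
    have : e = k + 1 := by omega
    subst this
    exact ⟨by omega, by omega, by simpa using hv⟩
  · rintro ⟨h1, h2, hv⟩
    exact ⟨e - 1, by omega, by omega, hv⟩

theorem pvChildrenPairwise (H : List Int) (c : Int) :
    (pvChildren H c).Pairwise (· < ·) := by
  unfold pvChildren
  exact List.Pairwise.map _ (fun a b h => h) ((PySem.List.pairwise_lt_enumerate H 1).filter _)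

theorem pvChildrenNodup (H : List Int) (c : Int) : (pvChildren H c).Nodup :=
  (pvChildrenPairwise H c).imp (fun h => by omega)

theorem pvChildrenNonneg (H : List Int) (c s : Int) (hs : s ∈ pvChildren H c) : 1 ≤ s := by
  obtain ⟨k, _, rfl, _⟩ := (pvMemChildren H c s).mp hs
  omega

-- the dict A builds looks up to exactly the children list
theorem pvTreeGetD (H : List Int) (c : Int) (hc : c ≠ -1) :
    ((PySem.List.enumerate H 1).foldl
        (fun d p => if p.2 ≠ -1 then d.modify p.2 [] (· ++ [p.1]) else d)
        PySem.Dict.empty).getD c []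
      = pvChildren H c := by
  have key : ∀ (l : List (Int × Int)) (d : PySem.Dict Int (List Int)),
      l.foldl (fun d p => if p.2 ≠ -1 then d.modify p.2 [] (· ++ [p.1]) else d) d
        = ((l.filter (fun p => decide (p.2 ≠ -1))).map (fun p => (p.2, p.1))).foldl
            (fun d q => d.modify q.1 [] (· ++ [q.2])) d := by
    intro l
    induction l with
    | nil => intro d; rfl
    | cons p t ih =>
      intro d
      by_cases hp : p.2 ≠ -1
      · rw [List.foldl_cons, if_pos hp]
        have hfil : List.filter (fun q : Int × Int => decide (q.2 ≠ -1)) (p :: t)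
            = p :: List.filter (fun q : Int × Int => decide (q.2 ≠ -1)) t := by
          simp [List.filter_cons, hp]
        rw [hfil, List.map_cons, List.foldl_cons]
        exact ih _
      · rw [List.foldl_cons, if_neg hp]
        have hfil : List.filter (fun q : Int × Int => decide (q.2 ≠ -1)) (p :: t)
            = List.filter (fun q : Int × Int => decide (q.2 ≠ -1)) t := by
          simp [List.filter_cons, hp]
        rw [hfil]
        exact ih _
  rw [key, PySem.Dict.getD_foldl_modify_append, PySem.Dict.getD_empty, List.nil_append]
  rw [List.filter_map, List.map_map, List.filter_filter]
  have hff : (fun a : Int × Int =>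
        ((fun q : Int × Int => q.1 == c) ∘ fun p : Int × Int => (p.2, p.1)) a
          && decide (a.2 ≠ -1))
      = fun p : Int × Int => p.2 == c := by
    funext p
    by_cases hp : p.2 = c
    · simp [hp, hc]
    · simp [hp]
  rw [hff]
  rfl

-- ---- B's single pass computes pvFinal ----

theorem pvScanB (H P : List Int) (n : Int) (hn : 1 ≤ n) (hL : (H.length : Int) ≤ n)
    (hPre : ∀ j : Nat, j < H.length →
      (H.getD j (-1) = -1 ∨ (1 ≤ H.getD j (-1) ∧ H.getD j (-1) ≤ (j : Int)))) :
    ∀ (l : List Int) (k : Nat) (reach : List Bool) (pr : List Int),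
      l = H.drop k →
      reach.length = (n + 1).toNat → pr.length = (n + 1).toNat →
      (∀ e : Nat, reach.getD e false = if 1 ≤ e ∧ (e = 1 ∨ e ≤ k) then pvReach H e else false) →
      (∀ e : Nat, pr.getD e 0 = if e ≤ k then pvFinal H P e else P.getD e 0) →
      ((PySem.List.enumerate l ((k : Int) + 1)).foldl
          (fun (st : List Bool × List Int) p =>
            if 1 ≤ p.2 ∧ p.2 ≤ n ∧ PySem.List.pyGetD st.1 p.2 false = true then
              (PySem.List.pySetD st.1 p.1 true,
               PySem.List.pySetD st.2 p.1
                 (PySem.List.pyGetD st.2 p.1 0 + PySem.List.pyGetD st.2 p.2 0))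
            else st) (reach, pr)).2.length = (n + 1).toNat ∧
      ∀ e : Nat, ((PySem.List.enumerate l ((k : Int) + 1)).foldl
          (fun (st : List Bool × List Int) p =>
            if 1 ≤ p.2 ∧ p.2 ≤ n ∧ PySem.List.pyGetD st.1 p.2 false = true then
              (PySem.List.pySetD st.1 p.1 true,
               PySem.List.pySetD st.2 p.1
                 (PySem.List.pyGetD st.2 p.1 0 + PySem.List.pyGetD st.2 p.2 0))
            else st) (reach, pr)).2.getD e 0 = pvFinal H P e := by
  intro l
  induction l with
  | nil =>
    intro k reach pr hd hlr hlp hreach hpr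
    have hk : H.length ≤ k := by
      have := List.drop_eq_nil_iff.mp hd.symm
      omega
    refine ⟨hlp, ?_⟩
    intro e
    simp only [PySem.List.enumerate_nil, List.foldl_nil]
    rw [hpr e]
    by_cases he : e ≤ k
    · rw [if_pos he]
    · rw [if_neg he, pvFinal_of_gt_len H P e (by omega)]
  | cons v l' ih =>
    intro k reach pr hd hlr hlp hreach hpr
    have hklen : k < H.length := by
      by_contra h
      rw [List.drop_eq_nil_iff.mpr (by omega)] at hd
      exact List.cons_ne_nil v l' hd
    have hv : H.getD k (-1) = v := by
      have h0 : H[k]? = some v := by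
        have h1 : (H.drop k)[0]? = some v := by rw [← hd]; rfl
        rwa [List.getElem?_drop, Nat.add_zero] at h1
      simp [List.getD, h0]
    have hl' : l' = H.drop (k + 1) := by
      have := congrArg List.tail hd
      simpa [List.tail_drop] using this
    have hkn : k + 1 < (n + 1).toNat := by omega
    rw [PySem.List.enumerate_cons, List.foldl_cons]
    have hcast : (k : Int) + 1 + 1 = ((k + 1 : Nat) : Int) + 1 := by push_cast; ring
    -- the one processed pair
    set step := fun (st : List Bool × List Int) (p : Int × Int) =>
      if 1 ≤ p.2 ∧ p.2 ≤ n ∧ PySem.List.pyGetD st.1 p.2 false = true then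
        (PySem.List.pySetD st.1 p.1 true,
         PySem.List.pySetD st.2 p.1
           (PySem.List.pyGetD st.2 p.1 0 + PySem.List.pyGetD st.2 p.2 0))
      else st with hstep
    have hpre_k := hPre k hklen
    rw [hv] at hpre_k
    -- establish the invariant for the state after this step, at k+1
    have hmain : (step (reach, pr) ((k : Int) + 1, v)).1.length = (n + 1).toNat ∧
        (step (reach, pr) ((k : Int) + 1, v)).2.length = (n + 1).toNat ∧
        (∀ e : Nat, (step (reach, pr) ((k : Int) + 1, v)).1.getD e false
          = if 1 ≤ e ∧ (e = 1 ∨ e ≤ k + 1) then pvReach H e else false) ∧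
        (∀ e : Nat, (step (reach, pr) ((k : Int) + 1, v)).2.getD e 0
          = if e ≤ k + 1 then pvFinal H P e else P.getD e 0) := by
      rcases hpre_k with hneg | ⟨hv1, hv2⟩
      · -- manager is -1: nothing happens
        have hcond : ¬ (1 ≤ v ∧ v ≤ n ∧ PySem.List.pyGetD reach v false = true) := by
          intro h
          have := h.1
          omega
        rw [hstep]
        simp only [if_neg hcond]
        refine ⟨hlr, hlp, ?_, ?_⟩
        · intro e
          rw [hreach e]
          by_cases h1 : 1 ≤ e ∧ (e = 1 ∨ e ≤ k)
          · rw [if_pos h1, if_pos ⟨h1.1, by omega⟩]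
          · by_cases h2 : 1 ≤ e ∧ (e = 1 ∨ e ≤ k + 1)
            · -- e = k + 1, not 1, reach must be false
              have he : e = k + 1 := by omega
              have h2e : 2 ≤ e := by omega
              rw [if_neg h1, if_pos h2, pvReach_eq H e h2e]
              rw [if_neg]
              intro hcc
              rw [show e - 1 = k from by omega, hv] at hcc
              omega
            · rw [if_neg h1, if_neg h2]
        · intro e
          rw [hpr e]
          by_cases h1 : e ≤ k
          · rw [if_pos h1, if_pos (by omega)]
          · by_cases h2 : e ≤ k + 1
            · have he : e = k + 1 := by omega
              rw [if_neg h1, if_pos h2]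
              subst he
              by_cases hone : k + 1 = 1
              · rw [hone, pvFinal_one]
              · rw [pvFinal_eq H P (k + 1) (by omega)]
                rw [show k + 1 - 1 = k from rfl, hv, if_neg (by intro hcc; omega)]
                ring
            · rw [if_neg h1, if_neg h2]
      · -- manager v is a real earlier employee
        have hk1 : 1 ≤ k := by omega
        have hvN : v.toNat ≤ k := by omega
        have hvN1 : 1 ≤ v.toNat := by omega
        have hrv : PySem.List.pyGetD reach v false = pvReach H v.toNat := by
          rw [pvPyGetD_nonneg reach v false (by omega), hreach v.toNat,
              if_pos ⟨by omega, by omega⟩]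
        have hget : PySem.List.pyGetD pr v 0 = pvFinal H P v.toNat := by
          rw [pvPyGetD_nonneg pr v 0 (by omega), hpr v.toNat, if_pos hvN]
        have hcastk : (k : Int) + 1 = ((k + 1 : Nat) : Int) := by push_cast; ring
        by_cases hr : pvReach H v.toNat = true
        · -- propagate
          have hcond : 1 ≤ v ∧ v ≤ n ∧ PySem.List.pyGetD reach v false = true := by
            refine ⟨hv1, by omega, ?_⟩
            rw [hrv]; exact hr
          rw [hstep]
          simp only [if_pos hcond]
          rw [hcastk, pvPySetD_nat, pvPySetD_nat, pvPyGetD_nat, hget]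
          refine ⟨by simp [hlr], by simp [hlp], ?_, ?_⟩
          · intro e
            rw [pvGetDSet, hreach e]
            by_cases he : e = k + 1
            · subst he
              rw [if_pos ⟨rfl, by omega⟩, if_pos ⟨by omega, by omega⟩]
              rw [pvReach_eq H (k + 1) (by omega), show k + 1 - 1 = k from rfl, hv]
              rw [if_pos ⟨hv1, by push_cast; omega⟩, hr]
            · rw [if_neg (by intro hcc; exact he hcc.1)]
              by_cases h1 : 1 ≤ e ∧ (e = 1 ∨ e ≤ k)
              · rw [if_pos h1, if_pos ⟨h1.1, by omega⟩]
              · rw [if_neg h1, if_neg (by omega)]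
          · intro e
            rw [pvGetDSet, hpr e]
            by_cases he : e = k + 1
            · subst he
              rw [if_pos ⟨rfl, by omega⟩, if_pos (by omega), hpr (k + 1), if_neg (by omega)]
              rw [pvFinal_eq H P (k + 1) (by omega), show k + 1 - 1 = k from rfl, hv]
              rw [if_pos ⟨hv1, by push_cast; omega⟩, hr, if_pos rfl]
            · rw [if_neg (by intro hcc; exact he hcc.1)]
              by_cases h1 : e ≤ k
              · rw [if_pos h1, if_pos (by omega)]
              · rw [if_neg h1, if_neg (by omega)]
        · -- manager unreachable: nothing happens
          have hcond : ¬ (1 ≤ v ∧ v ≤ n ∧ PySem.List.pyGetD reach v false = true) := by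
            intro h
            rw [hrv] at h
            exact hr h.2.2
          rw [hstep]
          simp only [if_neg hcond]
          refine ⟨hlr, hlp, ?_, ?_⟩
          · intro e
            rw [hreach e]
            by_cases h1 : 1 ≤ e ∧ (e = 1 ∨ e ≤ k)
            · rw [if_pos h1, if_pos ⟨h1.1, by omega⟩]
            · by_cases h2 : 1 ≤ e ∧ (e = 1 ∨ e ≤ k + 1)
              · have he : e = k + 1 := by omega
                rw [if_neg h1, if_pos h2]
                subst he
                rw [pvReach_eq H (k + 1) (by omega), show k + 1 - 1 = k from rfl, hv]
                rw [if_pos ⟨hv1, by push_cast; omega⟩]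
                simpa using hr
              · rw [if_neg h1, if_neg h2]
          · intro e
            rw [hpr e]
            by_cases h1 : e ≤ k
            · rw [if_pos h1, if_pos (by omega)]
            · by_cases h2 : e ≤ k + 1
              · have he : e = k + 1 := by omega
                rw [if_neg h1, if_pos h2]
                subst he
                rw [pvFinal_eq H P (k + 1) (by omega), show k + 1 - 1 = k from rfl, hv]
                rw [if_pos ⟨hv1, by push_cast; omega⟩]
                rw [if_neg (by simpa using hr)]
                ring
              · rw [if_neg h1, if_neg h2]
    obtain ⟨hm1, hm2, hm3, hm4⟩ := hmain
    have happ := ih (k + 1) (step (reach, pr) ((k : Int) + 1, v)).1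
      (step (reach, pr) ((k : Int) + 1, v)).2 hl' hm1 hm2 hm3 hm4
    rw [hcast]
    exact happ

-- ---- the inner BFS for-loop over one children list ----

theorem pvBfsFold (ce : Nat) :
    ∀ (subs : List Int) (q0 : List Int) (pr : List Int),
      ((ce : Int) ∉ subs) → subs.Nodup →
      (∀ s ∈ subs, 0 ≤ s ∧ s < (pr.length : Int)) →
      (subs.foldl (fun (st : List Int × List Int) s =>
          (st.1 ++ [s],
           PySem.List.pySetD st.2 s
             (PySem.List.pyGetD st.2 s 0 + PySem.List.pyGetD st.2 (ce : Int) 0)))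
        (q0, pr)).1 = q0 ++ subs ∧
      (subs.foldl (fun (st : List Int × List Int) s =>
          (st.1 ++ [s],
           PySem.List.pySetD st.2 s
             (PySem.List.pyGetD st.2 s 0 + PySem.List.pyGetD st.2 (ce : Int) 0)))
        (q0, pr)).2.length = pr.length ∧
      ∀ e : Nat, (subs.foldl (fun (st : List Int × List Int) s =>
          (st.1 ++ [s],
           PySem.List.pySetD st.2 s
             (PySem.List.pyGetD st.2 s 0 + PySem.List.pyGetD st.2 (ce : Int) 0)))
        (q0, pr)).2.getD e 0 =
        if (e : Int) ∈ subs then pr.getD e 0 + pr.getD ce 0 else pr.getD e 0 := by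
  intro subs
  induction subs with
  | nil =>
    intro q0 pr _ _ _
    refine ⟨by simp, rfl, ?_⟩
    intro e
    simp
  | cons s t ih =>
    intro q0 pr hce hnd hrange
    have hs0 : 0 ≤ s := (hrange s (by simp)).1
    obtain ⟨se, rfl⟩ : ∃ se : Nat, s = (se : Int) := ⟨s.toNat, by omega⟩
    have hselen : se < pr.length := by
      have := (hrange (se : Int) (by simp)).2
      omega
    rw [List.foldl_cons]
    set pr1 := pr.set se (pr.getD se 0 + pr.getD ce 0) with hpr1
    have hstate : (((q0, pr) : List Int × List Int).1 ++ [(se : Int)],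
        PySem.List.pySetD ((q0, pr) : List Int × List Int).2 (se : Int)
          (PySem.List.pyGetD ((q0, pr) : List Int × List Int).2 (se : Int) 0
            + PySem.List.pyGetD ((q0, pr) : List Int × List Int).2 (ce : Int) 0))
        = (q0 ++ [(se : Int)], pr1) := by
      rw [hpr1]
      simp only
      rw [pvPySetD_nat, pvPyGetD_nat, pvPyGetD_nat]
    rw [hstate]
    have hlen1 : pr1.length = pr.length := by simp [hpr1]
    have hcet : (ce : Int) ∉ t := fun h => hce (List.mem_cons_of_mem _ h)
    have hnd' : t.Nodup := hnd.of_cons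
    have hst : ((se : Int)) ∉ t := (List.nodup_cons.mp hnd).1
    have hrange' : ∀ x ∈ t, 0 ≤ x ∧ x < (pr1.length : Int) := by
      intro x hx
      rw [hlen1]
      exact hrange x (List.mem_cons_of_mem _ hx)
    obtain ⟨ih1, ih2, ih3⟩ := ih (q0 ++ [(se : Int)]) pr1 hcet hnd' hrange'
    have hcese : ce ≠ se := by
      intro h
      exact hce (by simp [h])
    refine ⟨?_, ?_, ?_⟩
    · rw [ih1, List.append_assoc, List.singleton_append]
    · rw [ih2, hlen1]
    · intro e
      rw [ih3 e]
      have hce_getD : pr1.getD ce 0 = pr.getD ce 0 := by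
        rw [hpr1, pvGetDSet, if_neg (by intro h; exact hcese h.1)]
      by_cases hmem : (e : Int) ∈ t
      · have hne : e ≠ se := by
          intro h
          subst h
          exact hst hmem
        rw [if_pos hmem, if_pos (by simp [hmem]), hce_getD, hpr1, pvGetDSet,
            if_neg (by intro h; exact hne h.1)]
      · by_cases hse : e = se
        · subst hse
          rw [if_neg hmem, if_pos (by simp), hpr1, pvGetDSet, if_pos ⟨rfl, hselen⟩]
        · have : (e : Int) ∉ (se : Int) :: t := by
            intro h
            rcases List.mem_cons.mp h with h | h
            · exact hse (by omega)
            · exact hmem h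
          rw [if_neg hmem, if_neg this, hpr1, pvGetDSet,
              if_neg (by intro h; exact hse h.1)]

-- ---- outside the final visited set everything is unreachable and untouched ----

theorem pvUnreach (H P : List Int) (U : Finset ℕ) (h1 : 1 ∈ U)
    (hchar : ∀ e : Nat, 2 ≤ e → e ≤ H.length → 1 ≤ H.getD (e - 1) (-1) →
        (e ∈ U ↔ (H.getD (e - 1) (-1)).toNat ∈ U)) :
    ∀ e : Nat, e ∉ U → pvReach H e = false ∧ pvFinal H P e = P.getD e 0 := by
  intro e
  induction e using Nat.strong_induction_on with
  | _ e ih =>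
    intro he
    match e, he, ih with
    | 0, he, ih => exact ⟨by rw [pvReach], by rw [pvFinal]⟩
    | 1, he, ih => exact absurd h1 he
    | (e'' + 2), he, ih =>
      by_cases hc : 1 ≤ H.getD (e'' + 2 - 1) (-1) ∧
          H.getD (e'' + 2 - 1) (-1) ≤ ((e'' + 2 : Nat) : Int) - 1
      · have hlen : e'' + 2 ≤ H.length := by
          by_contra hbig
          rw [List.getD_eq_default H (-1) (by omega)] at hc
          omega
        have hwlt : (H.getD (e'' + 2 - 1) (-1)).toNat < e'' + 2 := by
          have := hc.2
          omega
        have hw : (H.getD (e'' + 2 - 1) (-1)).toNat ∉ U := by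
          intro hmem
          exact he ((hchar (e'' + 2) (by omega) hlen hc.1).mpr hmem)
        obtain ⟨hr, _⟩ := ih _ hwlt hw
        constructor
        · rw [pvReach_eq H (e'' + 2) (by omega), if_pos hc, hr]
        · rw [pvFinal_eq H P (e'' + 2) (by omega), if_pos hc, hr]
          norm_num
      · constructor
        · rw [pvReach_eq H (e'' + 2) (by omega), if_neg hc]
        · rw [pvFinal_eq H P (e'' + 2) (by omega), if_neg hc]
          norm_num

-- ---- A's BFS loop computes pvFinal ----

theorem pvBfsA (H P : List Int) (n : Int) (hn : 1 ≤ n) (hL : (H.length : Int) ≤ n)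
    (hPre : ∀ j : Nat, j < H.length →
      (H.getD j (-1) = -1 ∨ (1 ≤ H.getD j (-1) ∧ H.getD j (-1) ≤ (j : Int))))
    (tree : PySem.Dict Int (List Int))
    (htree : ∀ c : Int, c ≠ -1 → tree.getD c [] = pvChildren H c) :
    ∀ (f : Nat) (qe : List Nat) (pr : List Int) (U : Finset Nat),
      qe.Nodup →
      (∀ e ∈ qe, e ∈ U) →
      1 ∈ U →
      (∀ e ∈ U, pvReach H e = true ∧
        (e = 1 ∨ (2 ≤ e ∧ e ≤ H.length ∧ 1 ≤ H.getD (e - 1) (-1)))) →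
      (∀ e : Nat, 2 ≤ e → e ≤ H.length → 1 ≤ H.getD (e - 1) (-1) →
        (e ∈ U ↔ ((H.getD (e - 1) (-1)).toNat ∈ U ∧ (H.getD (e - 1) (-1)).toNat ∉ qe))) →
      pr.length = (n + 1).toNat →
      (∀ e : Nat, pr.getD e 0 = if e ∈ U then pvFinal H P e else P.getD e 0) →
      U ⊆ insert 1 (Finset.Icc 2 H.length) →
      qe.length + (H.length + 1 - U.card) ≤ f →
      (pvBfs tree f (qe.map Int.ofNat) pr).length = (n + 1).toNat ∧
      ∀ e : Nat, (pvBfs tree f (qe.map Int.ofNat) pr).getD e 0 = pvFinal H P e := by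
  intro f
  induction f with
  | zero =>
    intro qe pr U hnd hqU h1U hUprop hchar hlen hpr hsub hfuel
    have hqe : qe = [] := by
      have hcard : U.card ≤ H.length + 1 := by
        calc U.card ≤ (insert 1 (Finset.Icc 2 H.length)).card := Finset.card_le_card hsub
        _ ≤ (Finset.Icc 2 H.length).card + 1 := Finset.card_insert_le _ _
        _ ≤ H.length + 1 := by rw [Nat.card_Icc]; omega
      have : qe.length = 0 := by omega
      exact List.eq_nil_of_length_eq_zero this
    subst hqe
    have hchar' : ∀ e : Nat, 2 ≤ e → e ≤ H.length → 1 ≤ H.getD (e - 1) (-1) →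
        (e ∈ U ↔ (H.getD (e - 1) (-1)).toNat ∈ U) := by
      intro e h2 hel hv
      have := hchar e h2 hel hv
      simpa using this
    refine ⟨hlen, ?_⟩
    intro e
    show pr.getD e 0 = pvFinal H P e
    rw [hpr e]
    by_cases he : e ∈ U
    · rw [if_pos he]
    · rw [if_neg he, (pvUnreach H P U h1U hchar' e he).2]
  | succ f ihf =>
    intro qe pr U hnd hqU h1U hUprop hchar hlen hpr hsub hfuel
    match qe, hnd, hqU, hfuel with
    | [], hnd, hqU, hfuel =>
      have hchar' : ∀ e : Nat, 2 ≤ e → e ≤ H.length → 1 ≤ H.getD (e - 1) (-1) →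
          (e ∈ U ↔ (H.getD (e - 1) (-1)).toNat ∈ U) := by
        intro e h2 hel hv
        have := hchar e h2 hel hv
        simpa using this
      refine ⟨hlen, ?_⟩
      intro e
      show pr.getD e 0 = pvFinal H P e
      rw [hpr e]
      by_cases he : e ∈ U
      · rw [if_pos he]
      · rw [if_neg he, (pvUnreach H P U h1U hchar' e he).2]
    | ce :: qe', hnd, hqU, hfuel =>
      have hceU : ce ∈ U := hqU ce (by simp)
      have hce1 : 1 ≤ ce := by
        rcases (hUprop ce hceU).2 with h | h <;> omega
      have hceI : (ce : Int) ≠ -1 := by omega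
      have hsubs := htree (ce : Int) hceI
      -- characterize the children as naturals
      have hsubs_iff : ∀ e : Nat, ((e : Int) ∈ pvChildren H (ce : Int)) ↔
          (2 ≤ e ∧ e ≤ H.length ∧ H.getD (e - 1) (-1) = (ce : Int)) := by
        intro e
        rw [pvMemChildrenNat]
        constructor
        · rintro ⟨h1, h2, h3⟩
          refine ⟨?_, h2, h3⟩
          rcases Nat.eq_or_lt_of_le h1 with h | h
          · exfalso
            rcases hPre (e - 1) (by omega) with hv | ⟨hv1, hv2⟩
            · rw [hv] at h3; omega
            · rw [h3] at hv2
              omega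
          · omega
        · rintro ⟨h1, h2, h3⟩
          exact ⟨by omega, h2, h3⟩
      have hsubs_nonneg : ∀ s ∈ pvChildren H (ce : Int), 1 ≤ s :=
        fun s hs => pvChildrenNonneg H (ce : Int) s hs
      set subs := pvChildren H (ce : Int) with hsubsdef
      set subsN := subs.map Int.toNat with hsubsN
      have hmapback : subsN.map Int.ofNat = subs := by
        rw [hsubsN, List.map_map]
        conv_rhs => rw [← List.map_id subs]
        apply List.map_congr_left
        intro s hs
        have := hsubs_nonneg s hs
        simp only [Function.comp_apply, id_eq, Int.ofNat_eq_natCast]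
        omega
      have hmemN : ∀ e : Nat, e ∈ subsN ↔ (e : Int) ∈ subs := by
        intro e
        constructor
        · intro h
          rw [← hmapback]
          exact List.mem_map.mpr ⟨e, h, by simp⟩
        · intro h
          rw [hsubsN]
          exact List.mem_map.mpr ⟨(e : Int), h, by simp⟩
      have hmemN2 : ∀ e : Nat, e ∈ subsN ↔
          (2 ≤ e ∧ e ≤ H.length ∧ H.getD (e - 1) (-1) = (ce : Int)) := by
        intro e
        rw [hmemN e, hsubsdef, hsubs_iff e]
      have hceq' : ce ∉ qe' := (List.nodup_cons.mp hnd).1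
      have hndq' : qe'.Nodup := (List.nodup_cons.mp hnd).2
      have hceNsubs : ce ∉ subsN := by
        intro h
        obtain ⟨h2, hel, hv⟩ := (hmemN2 ce).mp h
        rcases hPre (ce - 1) (by omega) with hx | ⟨hx1, hx2⟩
        · rw [hx] at hv; omega
        · rw [hv] at hx2
          omega
      have hceIsubs : (ce : Int) ∉ subs := by
        intro h
        exact hceNsubs ((hmemN ce).mpr h)
      have hsubs_notU : ∀ e ∈ subsN, e ∉ U := by
        intro e he
        obtain ⟨h2, hel, hv⟩ := (hmemN2 e).mp he
        intro heU
        have := (hchar e h2 hel (by rw [hv]; omega)).mp heU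
        rw [hv] at this
        simp at this
      have hsubsNnd : subsN.Nodup := by
        have hp : subs.Pairwise (· < ·) := by rw [hsubsdef]; exact pvChildrenPairwise H _
        have hpN : subsN.Pairwise (· < ·) := by
          rw [hsubsN, List.pairwise_map]
          refine List.Pairwise.imp_of_mem ?_ hp
          intro a b ha hb hab
          have h1 := hsubs_nonneg a ha
          have h2 := hsubs_nonneg b hb
          omega
        exact hpN.imp (fun h => by omega)
      -- run the inner for-loop
      have hrange : ∀ s ∈ subs, 0 ≤ s ∧ s < (pr.length : Int) := by
        intro s hs
        obtain ⟨h2, hel, _⟩ := (hmemN2 s.toNat).mp ((hmemN s.toNat).mpr (by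
          have h1 := hsubs_nonneg s hs
          have : ((s.toNat : Nat) : Int) = s := by omega
          rwa [this]))
        have h1 := hsubs_nonneg s hs
        constructor
        · omega
        · rw [hlen]; omega
      obtain ⟨hf1, hf2, hf3⟩ := pvBfsFold ce subs (qe'.map Int.ofNat) pr
        hceIsubs (by rw [hsubsdef]; exact pvChildrenNodup H _) hrange
      -- unfold one BFS step
      rw [List.map_cons]
      simp only [Int.ofNat_eq_natCast]
      rw [pvBfs, hsubs]
      set st := (subs.foldl (fun (st : List Int × List Int) s =>
          (st.1 ++ [s],
           PySem.List.pySetD st.2 s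
             (PySem.List.pyGetD st.2 s 0 + PySem.List.pyGetD st.2 (ce : Int) 0)))
        (qe'.map Int.ofNat, pr)) with hstdef
      have hst1 : st.1 = (qe' ++ subsN).map Int.ofNat := by
        rw [hstdef, hf1, List.map_append, hmapback]
      -- the new visited set
      set U' := U ∪ subsN.toFinset with hU'
      have hUsub : U ⊆ U' := Finset.subset_union_left
      have hmemU' : ∀ e : Nat, e ∈ U' ↔ e ∈ U ∨ e ∈ subsN := by
        intro e
        rw [hU']
        simp [Finset.mem_union]
      have hdisj : Disjoint U subsN.toFinset := by
        rw [Finset.disjoint_right]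
        intro a ha
        exact hsubs_notU a (List.mem_toFinset.mp ha)
      have hcard' : U'.card = U.card + subsN.length := by
        rw [hU', Finset.card_union_of_disjoint hdisj, List.toFinset_card_of_nodup hsubsNnd]
      have hsub' : U' ⊆ insert 1 (Finset.Icc 2 H.length) := by
        intro a ha
        rcases (hmemU' a).mp ha with h | h
        · exact hsub h
        · obtain ⟨h2, hel, _⟩ := (hmemN2 a).mp h
          simp [Finset.mem_insert, Finset.mem_Icc]
          omega
      have hcard'le : U'.card ≤ H.length + 1 := by
        calc U'.card ≤ (insert 1 (Finset.Icc 2 H.length)).card := Finset.card_le_card hsub'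
        _ ≤ (Finset.Icc 2 H.length).card + 1 := Finset.card_insert_le _ _
        _ ≤ H.length + 1 := by rw [Nat.card_Icc]; omega
      -- apply the induction hypothesis
      have happ := ihf (qe' ++ subsN) st.2 U' ?_ ?_ (hUsub h1U) ?_ ?_ ?_ ?_ hsub' ?_
      · rw [← hst1] at happ
        exact happ
      · -- Nodup
        refine List.Nodup.append hndq' hsubsNnd ?_
        intro a ha hb
        exact hsubs_notU a hb (hqU a (by simp [ha]))
      · -- queue ⊆ U'
        intro e he
        rcases List.mem_append.mp he with h | h
        · exact hUsub (hqU e (by simp [h]))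
        · exact (hmemU' e).mpr (Or.inr h)
      · -- properties of U' members
        intro e he
        rcases (hmemU' e).mp he with h | h
        · exact hUprop e h
        · obtain ⟨h2, hel, hv⟩ := (hmemN2 e).mp h
          have hcond : 1 ≤ H.getD (e - 1) (-1) ∧ H.getD (e - 1) (-1) ≤ (e : Int) - 1 := by
            rcases hPre (e - 1) (by omega) with hx | ⟨hx1, hx2⟩
            · rw [hx] at hv; omega
            · refine ⟨hx1, ?_⟩
              have : ((e - 1 : Nat) : Int) = (e : Int) - 1 := by omega
              rw [← this]
              exact hx2
          constructor
          · rw [pvReach_eq H e h2, if_pos hcond, hv]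
            simp only [Int.toNat_natCast]
            exact (hUprop ce hceU).1
          · right
            exact ⟨h2, hel, hcond.1⟩
      · -- the characterization for U'
        intro e h2 hel hv1
        set w := (H.getD (e - 1) (-1)).toNat with hw
        by_cases hesub : e ∈ subsN
        · obtain ⟨_, _, hv⟩ := (hmemN2 e).mp hesub
          have hwce : w = ce := by rw [hw, hv]; simp
          constructor
          · intro _
            constructor
            · rw [hwce]; exact hUsub hceU
            · rw [hwce]
              intro hmem
              rcases List.mem_append.mp hmem with h | h
              · exact hceq' h
              · exact hceNsubs h
          · intro _
            exact (hmemU' e).mpr (Or.inr hesub)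
        · by_cases heU : e ∈ U
          · have hold := (hchar e h2 hel hv1).mp heU
            constructor
            · intro _
              refine ⟨hUsub hold.1, ?_⟩
              intro hmem
              rcases List.mem_append.mp hmem with h | h
              · exact hold.2 (List.mem_cons_of_mem _ h)
              · exact hsubs_notU w h hold.1
            · intro _
              exact hUsub heU
          · constructor
            · intro habs
              exact absurd habs (by
                intro habs'
                rcases (hmemU' e).mp habs' with h | h
                · exact heU h
                · exact hesub h)
            · rintro ⟨hw', hwq⟩
              exfalso
              rcases (hmemU' w).mp hw' with hwU | hwsub
              · -- w was already visited; it cannot be ce nor in qe'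
                have hwne : w ≠ ce := by
                  intro hwc
                  apply hesub
                  rw [hmemN2]
                  refine ⟨h2, hel, ?_⟩
                  rw [hw] at hwc
                  omega
                have : e ∈ U := by
                  rw [hchar e h2 hel hv1]
                  refine ⟨hwU, ?_⟩
                  intro hmem
                  rcases List.mem_cons.mp hmem with h | h
                  · exact hwne h
                  · exact hwq (List.mem_append.mpr (Or.inl h))
                exact heU this
              · exact hwq (List.mem_append.mpr (Or.inr hwsub))
      · -- length
        rw [hstdef, hf2, hlen]
      · -- praise values
        intro e
        rw [hstdef, hf3 e]
        have hprce : pr.getD ce 0 = pvFinal H P ce := by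
          rw [hpr ce, if_pos hceU]
        by_cases hesub : (e : Int) ∈ subs
        · have hesubN : e ∈ subsN := (hmemN e).mpr hesub
          obtain ⟨h2, hel, hv⟩ := (hmemN2 e).mp hesubN
          have heU : e ∉ U := hsubs_notU e hesubN
          rw [if_pos hesub, hpr e, if_neg heU, hprce,
              if_pos ((hmemU' e).mpr (Or.inr hesubN))]
          have hcond : 1 ≤ H.getD (e - 1) (-1) ∧ H.getD (e - 1) (-1) ≤ (e : Int) - 1 := by
            rcases hPre (e - 1) (by omega) with hx | ⟨hx1, hx2⟩
            · rw [hx] at hv; omega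
            · refine ⟨hx1, ?_⟩
              have : ((e - 1 : Nat) : Int) = (e : Int) - 1 := by omega
              rw [← this]
              exact hx2
          rw [pvFinal_eq H P e h2, if_pos hcond, hv]
          simp only [Int.toNat_natCast]
          rw [(hUprop ce hceU).1, if_pos rfl]
        · have hesubN : e ∉ subsN := fun h => hesub ((hmemN e).mp h)
          rw [if_neg hesub, hpr e]
          by_cases heU : e ∈ U
          · rw [if_pos heU, if_pos (hUsub heU)]
          · rw [if_neg heU, if_neg (by
              intro h
              rcases (hmemU' e).mp h with h | h
              · exact heU h
              · exact hesubN h)]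
      · -- fuel
        rw [List.length_append]
        have hlq : subsN.length = subs.length := by rw [hsubsN, List.length_map]
        simp only [List.length_cons] at hfuel
        omega

-- ---- the trivial case: nobody reports to employee 1, so nothing propagates ----

theorem pvBfsNil (tree : PySem.Dict Int (List Int)) (f : Nat) (pr : List Int) :
    pvBfs tree f [] pr = pr := by
  cases f <;> rfl

theorem pvChildrenOneEmpty (H : List Int) (h1 : (1 : Int) ∉ H) :
    pvChildren H 1 = [] := by
  rw [List.eq_nil_iff_forall_not_mem]
  intro s hs
  obtain ⟨k, hk, _, hv⟩ := (pvMemChildren H 1 s).mp hs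
  apply h1
  rw [List.getD_eq_getElem H (-1) hk] at hv
  rw [← hv]
  exact List.getElem_mem hk

theorem pvReplicateGetD (N e : Nat) : (List.replicate N false).getD e false = false := by
  rcases lt_or_ge e N with h | h
  · rw [List.getD_eq_getElem _ _ (by simpa using h)]
    simp
  · exact List.getD_eq_default _ _ (by simpa using h)

theorem pvScanTrivial (n : Int) (hn : 1 ≤ n) (reach : List Bool) (pr : List Int)
    (hreach : reach = (List.replicate (n + 1).toNat false).set 1 true) :
    ∀ (l : List Int) (s : Int), ((1 : Int) ∉ l) →
      (PySem.List.enumerate l s).foldl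
        (fun (st : List Bool × List Int) p =>
          if 1 ≤ p.2 ∧ p.2 ≤ n ∧ PySem.List.pyGetD st.1 p.2 false = true then
            (PySem.List.pySetD st.1 p.1 true,
             PySem.List.pySetD st.2 p.1
               (PySem.List.pyGetD st.2 p.1 0 + PySem.List.pyGetD st.2 p.2 0))
          else st) (reach, pr) = (reach, pr) := by
  intro l
  induction l with
  | nil =>
    intro s _
    rfl
  | cons v t ih =>
    intro s hmem
    have hv1 : v ≠ (1 : Int) := fun h => hmem (by simp [h])
    have ht : (1 : Int) ∉ t := fun h => hmem (List.mem_cons_of_mem _ h)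
    rw [PySem.List.enumerate_cons, List.foldl_cons]
    have hcond : ¬ (1 ≤ v ∧ v ≤ n ∧ PySem.List.pyGetD reach v false = true) := by
      rintro ⟨h1, h2, h3⟩
      rw [pvPyGetD_nonneg reach v false (by omega), hreach, pvGetDSet] at h3
      rw [if_neg (by
        rintro ⟨ha, _⟩
        have : v = 1 := by omega
        exact hv1 this)] at h3
      rw [pvReplicateGetD] at h3
      exact Bool.false_ne_true h3
    rw [if_neg hcond]
    exact ih (s + 1) ht

-- ===== VERDICT (by name: the statement is the Claim_ definition above) =====
theorem propagate_praise_spec : Claim_equal_propagate_praise := by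
  unfold Claim_equal_propagate_praise
  intro n m H praises _ hpre
  unfold Spec_propagate_praise
  obtain ⟨hn, _, hcase⟩ := hpre
  unfold propagate_praise propagate_praise_alt
  simp only []
  set P := pvInit n praises with hP
  have hPlen : P.length = (n + 1).toNat := pvInit_length n praises
  have hN2 : 2 ≤ (n + 1).toNat := by omega
  set tree := (PySem.List.enumerate H 1).foldl
    (fun d p => if p.2 ≠ -1 then d.modify p.2 [] (· ++ [p.1]) else d) PySem.Dict.empty
    with htreedef
  have htree : ∀ c : Int, c ≠ -1 → tree.getD c [] = pvChildren H c := by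
    intro c hc
    rw [htreedef]
    exact pvTreeGetD H c hc
  have hone : (1 : Int) = ((1 : Nat) : Int) := by norm_num
  have hreach0 : PySem.List.pySetD (List.replicate (n + 1).toNat false) 1 true
      = (List.replicate (n + 1).toNat false).set 1 true := by
    rw [hone, pvPySetD_nat]
  rcases hcase with ⟨hL, hPreH⟩ | htriv
  · -- well-formed hierarchy: both sides compute pvFinal
    have hA := pvBfsA H P n hn hL hPreH tree htree (H.length + 1) [1] P {1}
      (by simp) (by simp) (by simp)
      (by
        intro e he
        rw [Finset.mem_singleton] at he
        subst he
        exact ⟨pvReach_one H, Or.inl rfl⟩)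
      (by
        intro e h2 hel hv
        constructor
        · intro h
          rw [Finset.mem_singleton] at h
          omega
        · rintro ⟨h1, h2'⟩
          rw [Finset.mem_singleton] at h1
          exact absurd (List.mem_singleton.mpr h1) h2')
      hPlen
      (by
        intro e
        by_cases he : e ∈ ({1} : Finset Nat)
        · rw [if_pos he, Finset.mem_singleton.mp he, pvFinal_one]
        · rw [if_neg he])
      (by simp)
      (by simp; omega)
    have hA1 : (List.map Int.ofNat [1]) = ([1] : List Int) := by simp
    rw [hA1] at hA
    have hB := pvScanB H P n hn hL hPreH H 0 ((List.replicate (n + 1).toNat false).set 1 true) P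
      (by rw [List.drop_zero])
      (by simp) hPlen
      (by
        intro e
        rw [pvGetDSet]
        by_cases he : e = 1
        · subst he
          rw [if_pos ⟨rfl, by simp; omega⟩, if_pos ⟨by omega, Or.inl rfl⟩, pvReach_one]
        · rw [if_neg (by intro h; exact he h.1), if_neg (by omega)]
          exact pvReplicateGetD _ _)
      (by
        intro e
        by_cases he : e ≤ 0
        · have : e = 0 := by omega
          rw [if_pos he, this, pvFinal_zero]
        · rw [if_neg he])
    have hzero : ((0 : Nat) : Int) + 1 = (1 : Int) := by norm_num
    rw [hzero] at hB
    rw [hreach0]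
    obtain ⟨hAlen, hAval⟩ := hA
    obtain ⟨hBlen, hBval⟩ := hB
    congr 1
    apply List.ext_getElem (by rw [hAlen, hBlen])
    intro i h1 h2
    have hA' := hAval i
    have hB' := hBval i
    rw [List.getD_eq_getElem _ 0 h1] at hA'
    rw [List.getD_eq_getElem _ 0 h2] at hB'
    rw [hA', hB']
  · -- nobody reports to employee 1: both sides leave the praise array unchanged
    have htree1 : tree.getD 1 [] = [] := by
      rw [htree 1 (by norm_num), pvChildrenOneEmpty H htriv]
    have hA : pvBfs tree (H.length + 1) [1] P = P := by
      rw [pvBfs, htree1]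
      simp only [List.foldl_nil]
      exact pvBfsNil tree H.length P
    have hB := pvScanTrivial n hn ((List.replicate (n + 1).toNat false).set 1 true) P rfl
      H 1 htriv
    rw [hreach0, hA, hB]
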